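-- pv_equiv track=rewrite | github.com/sanjanaps55/Drones-project | scripts/prepare_dataset.py | _distinct_colors
-- ===== SOURCE A (Python) =====
-- def _distinct_colors(n: int) -> list[tuple[int, int, int]]:
--     """Generate n BGR colors for drawing."""
--     if n <= 0:
--         return []
--     base = [
--         (255, 99, 71),
--         (60, 179, 113),
--         (30, 144, 255),
--         (255, 191, 0),
--         (147, 112, 219),
--         (0, 165, 255),
--         (203, 192, 255),
--     ]
--     out: list[tuple[int, int, int]] = []
--     for i in range(n):
--         out.append(base[i % len(base)])
--     return out
-- ===== SOURCE B (Python) =====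
-- def _distinct_colors(n: int) -> list[tuple[int, int, int]]:
--     """Generate n BGR colors for drawing."""
--     base = [
--         (255, 99, 71),
--         (60, 179, 113),
--         (30, 144, 255),
--         (255, 191, 0),
--         (147, 112, 219),
--         (0, 165, 255),
--         (203, 192, 255),
--     ]
--     reps = n // len(base) + 1
--     return (base * reps)[:n]
-- ===== Notes on version B (the rewrite author's own statement) =====
-- stated objective: idiomatic
-- what changed: Replaces the per-element loop with modulo indexing and append by one bulk list replication (base * (n//7+1)) followed by a slice [:n].
import Mathlib
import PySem

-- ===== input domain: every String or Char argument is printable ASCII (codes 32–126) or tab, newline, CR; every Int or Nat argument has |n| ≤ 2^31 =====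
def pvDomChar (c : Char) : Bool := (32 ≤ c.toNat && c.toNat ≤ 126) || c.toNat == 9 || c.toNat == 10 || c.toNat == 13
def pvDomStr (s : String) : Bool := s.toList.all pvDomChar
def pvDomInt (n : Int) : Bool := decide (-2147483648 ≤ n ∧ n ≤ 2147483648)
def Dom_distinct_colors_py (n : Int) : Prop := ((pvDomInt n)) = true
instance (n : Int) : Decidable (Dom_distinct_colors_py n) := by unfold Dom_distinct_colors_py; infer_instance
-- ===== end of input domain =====

-- B replaces A's per-element loop with modulo indexing by one bulk replication plus a slice (idiomatic; same O(n) cost).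

-- the shared literal `base` list of both Pythons
def pvBase : List (Int × Int × Int) :=
  [(255, 99, 71), (60, 179, 113), (30, 144, 255), (255, 191, 0),
   (147, 112, 219), (0, 165, 255), (203, 192, 255)]

-- ===== PORT A =====
-- literal port: guard n <= 0, then for i in range(n): out.append(base[i % len(base)])
-- (base[i % 7] never raises: 0 <= i % 7 < 7, so pyGetD with a dummy default is exact)
def distinct_colors_py (n : Int) : List (Int × Int × Int) :=
  if n ≤ 0 then []
  else
    (PySem.List.pyRange 0 n 1).foldl
      (fun out i => out ++ [PySem.List.pyGetD pvBase (PySem.Int.mod i (pvBase.length : Int)) (0, 0, 0)])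
      []

-- ===== PORT B =====
-- literal port of Source B: reps = n // len(base) + 1; return (base * reps)[:n]
def distinct_colors_py_alt (n : Int) : List (Int × Int × Int) :=
  let reps : Int := PySem.Int.floordiv n (pvBase.length : Int) + 1
  PySem.List.slice (List.replicate reps.toNat pvBase).flatten none (some n)

-- ===== PRECONDITION & SPEC =====
def Spec_distinct_colors_py (n : Int) (out : List (Int × Int × Int)) : Prop := out = distinct_colors_py_alt n
instance (n : Int) (out : List (Int × Int × Int)) : Decidable (Spec_distinct_colors_py n out) := by unfold Spec_distinct_colors_py; infer_instance

-- ===== CLAIM (what is proved, stated in full; the proofs are below) =====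
def Claim_equal_distinct_colors_py : Prop := ∀ (n : Int), Dom_distinct_colors_py n → Spec_distinct_colors_py n (distinct_colors_py n)

-- ===== LEMMAS AND PROOFS =====

-- the common cyclic element function
def pvCyc (i : Nat) : Int × Int × Int := pvBase.getD (i % 7) (0, 0, 0)

theorem pv_foldl_append {α β : Type} (f : α → β) :
    ∀ (l : List α) (init : List β),
      l.foldl (fun out i => out ++ [f i]) init = init ++ l.map f := by
  intro l
  induction l with
  | nil => simp
  | cons x xs ih => intro init; simp [List.foldl, ih]

-- A's loop produces the first m values of the cycle
theorem pvA_eq_map (n : Int) (hn : 0 < n) :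
    distinct_colors_py n = (List.range n.toNat).map pvCyc := by
  unfold distinct_colors_py
  rw [if_neg (by omega)]
  rw [pv_foldl_append, List.nil_append, PySem.List.pyRange_one]
  simp only [Int.sub_zero, List.map_map]
  apply List.map_congr_left
  intro k _
  simp only [Function.comp, zero_add]
  show PySem.List.pyGetD pvBase (PySem.Int.mod (k : Int) ((pvBase.length : Nat) : Int)) _ = pvCyc k
  rw [PySem.Int.mod_natCast k pvBase.length]
  rw [PySem.List.pyGetD_natCast]
  simp [pvCyc, pvBase]

-- B's replicated-and-flattened list is the full cycle of length 7*k
theorem pvFlatten_replicate (k : Nat) :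
    (List.replicate k pvBase).flatten = (List.range (7 * k)).map pvCyc := by
  induction k with
  | zero => simp
  | succ k ih =>
    rw [List.replicate_succ, List.flatten_cons, ih]
    have h7 : 7 * (k + 1) = 7 + 7 * k := by ring
    have h1 : (List.range 7).map pvCyc = pvBase := by decide
    have h2 : (List.range (7 * k)).map (pvCyc ∘ fun x => 7 + x)
        = (List.range (7 * k)).map pvCyc :=
      List.map_congr_left (fun i _ => by simp [Function.comp, pvCyc, Nat.add_mod_left])
    rw [h7, List.range_add, List.map_append, List.map_map, h1, h2]

theorem pvB_eq_map (n : Int) :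
    distinct_colors_py_alt n = (List.range n.toNat).map pvCyc := by
  unfold distinct_colors_py_alt
  have hlen : ((pvBase.length : Nat) : Int) = (7 : Int) := by decide
  simp only [hlen]
  by_cases h : n ≤ 0
  · have hz : n.toNat = 0 := by omega
    rcases h.lt_or_eq with hlt | heq
    · have hq : PySem.Int.floordiv n 7 < 0 := by
        have hmul := PySem.Int.floordiv_mul_add_mod n 7
        have h1 := PySem.Int.mod_nonneg n (b := 7) (by omega)
        have h2 := PySem.Int.mod_lt n (b := 7) (by omega)
        nlinarith
      have h0 : (PySem.Int.floordiv n 7 + 1).toNat = 0 := by omega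
      rw [h0]
      simp [PySem.List.slice, hz]
    · subst heq
      rw [PySem.List.slice_to _ (le_refl 0)]
      simp
  · push_neg at h
    rw [PySem.List.slice_to _ (by omega)]
    have hdiv : PySem.Int.floordiv n 7 = n / 7 := PySem.Int.floordiv_eq_ediv_of_pos (by omega)
    have hreps : (PySem.Int.floordiv n 7 + 1).toNat = n.toNat / 7 + 1 := by rw [hdiv]; omega
    rw [hreps, pvFlatten_replicate, ← List.map_take, List.take_range]
    have hmin : min n.toNat (7 * (n.toNat / 7 + 1)) = n.toNat := by omega
    rw [hmin]

-- ===== VERDICT (by name: the statement is the Claim_ definition above) =====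
theorem distinct_colors_py_spec : Claim_equal_distinct_colors_py := by
  intro n _
  unfold Spec_distinct_colors_py
  by_cases h : n ≤ 0
  · rw [pvB_eq_map]
    have hz : n.toNat = 0 := by omega
    simp [distinct_colors_py, h, hz]
  · push_neg at h
    rw [pvA_eq_map n h, pvB_eq_map]
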